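-- pv_equiv track=rewrite | github.com/kelano/BrickDNN | dataset/dataset.py | get_batch_indices
-- ===== SOURCE A (Python) =====
-- def get_batch_indices(batch_size, length):
--     batches = []
--     if length == 0:
--         return batches
--     start = 0
--     end = min(length, start + batch_size)
--     while start != end:
--         if end - start == batch_size:
--             batches.append([start, end])
--         start = end
--         end = min(length, start + batch_size)
--     return batches
-- ===== SOURCE B (Python) =====
-- def get_batch_indices(batch_size, length):
--     if batch_size <= 0:
--         return []
--     n = length // batch_size
--     return [[i * batch_size, (i + 1) * batch_size] for i in range(n)]
-- ===== Notes on version B (the rewrite author's own statement) =====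
-- stated objective: simpler
-- what changed: Replaces A's two-pointer while loop (start/end with min() recomputation and a full-batch check) by computing the number of full batches n = length // batch_size up front and emitting [[i*b,(i+1)*b] for i in range(n)].
import Mathlib
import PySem

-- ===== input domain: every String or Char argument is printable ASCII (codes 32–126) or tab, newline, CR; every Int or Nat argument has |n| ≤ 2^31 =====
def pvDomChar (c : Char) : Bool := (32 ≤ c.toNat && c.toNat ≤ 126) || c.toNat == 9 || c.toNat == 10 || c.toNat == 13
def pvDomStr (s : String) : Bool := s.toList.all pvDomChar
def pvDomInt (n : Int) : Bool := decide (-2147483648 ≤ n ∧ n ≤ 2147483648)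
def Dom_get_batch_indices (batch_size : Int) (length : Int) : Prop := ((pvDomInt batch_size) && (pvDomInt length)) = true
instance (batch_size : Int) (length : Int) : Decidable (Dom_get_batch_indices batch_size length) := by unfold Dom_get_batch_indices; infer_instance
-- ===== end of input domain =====

-- B replaces A's two-pointer while loop by computing n = length // batch_size and emitting the n full-batch pairs directly (objective: simpler).

-- ===== PORT A =====
-- A's while loop, with fuel (length.toNat + 1 bounds the iteration count whenever the loop terminates on Pre_).
def gbiLoopA (batch_size length : Int) : Nat → List (List Int) → Int → Int → List (List Int)
  | 0, batches, _, _ => batches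
  | fuel + 1, batches, start, en =>
    if start = en then batches
    else
      let batches' := if en - start = batch_size then batches ++ [[start, en]] else batches
      let start' := en
      let en' := min length (start' + batch_size)
      gbiLoopA batch_size length fuel batches' start' en'

def get_batch_indices (batch_size : Int) (length : Int) : List (List Int) :=
  if length = 0 then []
  else gbiLoopA batch_size length (length.toNat + 1) [] 0 (min length (0 + batch_size))

-- ===== PORT B =====
def get_batch_indices_alt (batch_size : Int) (length : Int) : List (List Int) :=
  if batch_size ≤ 0 then []
  else (PySem.List.pyRange 0 (PySem.Int.floordiv length batch_size) 1).map
        (fun i => [i * batch_size, (i + 1) * batch_size])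

-- ===== PRECONDITION & SPEC =====
-- Pre_ excludes batch_size < 0 with length ≠ 0, on which A's while loop never terminates (start drifts to -∞).
def Pre_get_batch_indices (batch_size : Int) (length : Int) : Prop := 0 ≤ batch_size ∨ length = 0
instance (batch_size : Int) (length : Int) : Decidable (Pre_get_batch_indices batch_size length) := by unfold Pre_get_batch_indices; infer_instance
def pvWitness_get_batch_indices : Int × Int := (3, 10)

def Spec_get_batch_indices (batch_size : Int) (length : Int) (out : List (List Int)) : Prop := out = get_batch_indices_alt batch_size length
instance (batch_size : Int) (length : Int) (out : List (List Int)) : Decidable (Spec_get_batch_indices batch_size length out) := by unfold Spec_get_batch_indices; infer_instance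

-- ===== CLAIM (what is proved, stated in full; the proofs are below) =====
def Claim_equal_get_batch_indices : Prop := ∀ (batch_size : Int) (length : Int), Dom_get_batch_indices batch_size length → Pre_get_batch_indices batch_size length → Spec_get_batch_indices batch_size length (get_batch_indices batch_size length)

-- ===== LEMMAS AND PROOFS =====

-- Main loop invariant for the positive-batch case: starting at start = k*b with acc accumulated,
-- the loop appends exactly the full batches k, k+1, …, length//b - 1.
theorem gbiLoopA_spec (b length : Int) (hb : 0 < b) :
    ∀ (fuel : Nat) (k : Int) (acc : List (List Int)),
      0 ≤ k → k * b ≤ length → (length - k * b).toNat < fuel →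
      gbiLoopA b length fuel acc (k * b) (min length (k * b + b)) =
        acc ++ (PySem.List.pyRange k (PySem.Int.floordiv length b) 1).map
          (fun i => [i * b, (i + 1) * b]) := by
  intro fuel
  induction fuel with
  | zero => intro k acc _ _ hf; omega
  | succ fuel ih =>
    intro k acc hk hkb hf
    by_cases hstop : k * b = min length (k * b + b)
    · -- loop exit: min length (k*b+b) = k*b, so length = k*b (since b > 0)
      have hlen : length = k * b := by omega
      have hdiv : PySem.Int.floordiv length b = k := by
        rw [PySem.Int.floordiv_eq_iff_of_pos hb]
        constructor
        · omega
        · nlinarith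
      simp [gbiLoopA, ← hstop, hdiv, PySem.List.pyRange_one_eq_nil (le_refl k)]
    · by_cases hfull : k * b + b ≤ length
      · -- full batch: end = k*b + b, append, recurse at k+1
        have hen : min length (k * b + b) = k * b + b := by omega
        have hne : k * b ≠ min length (k * b + b) := hstop
        have e1 : length - (k + 1) * b = length - k * b - b := by ring
        have e2 : k * b + b ≤ length := hfull
        have hrec := ih (k + 1) (acc ++ [[k * b, k * b + b]]) (by omega)
          (by omega) (by omega)
        have hdivlt : k < PySem.Int.floordiv length b := by
          have := (PySem.Int.le_floordiv_iff_mul_le (a := length) (b := b) (q := k + 1) hb).mpr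
            (by nlinarith)
          omega
        rw [PySem.List.pyRange_one_cons hdivlt]
        simp only [gbiLoopA, hen, if_neg (by omega : ¬ (k * b = k * b + b))]
        have harith : k * b + b - k * b = b := by ring
        rw [if_pos harith]
        have e3 : (k + 1) * b = k * b + b := by ring
        rw [e3] at hrec
        rw [hrec]
        simp [e3, List.append_assoc]
      · -- partial tail: end = length, no append, next iteration exits
        have hen : min length (k * b + b) = length := by omega
        have hlt : k * b < length := by omega
        have hdiv : PySem.Int.floordiv length b = k := by
          rw [PySem.Int.floordiv_eq_iff_of_pos hb]
          constructor
          · exact hkb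
          · nlinarith
        have hnotfull : ¬ (length - k * b = b) := by omega
        obtain ⟨fuel', rfl⟩ : ∃ f, fuel = f + 1 := ⟨fuel - 1, by omega⟩
        simp [gbiLoopA, hen, hnotfull,
          PySem.List.pyRange_one_eq_nil (le_refl k), hdiv,
          show min length (length + b) = length by omega]

-- ===== VERDICT (by name: the statement is the Claim_ definition above) =====
theorem get_batch_indices_spec : Claim_equal_get_batch_indices := by
  intro b length _ hpre
  unfold Spec_get_batch_indices get_batch_indices get_batch_indices_alt
  by_cases hlen0 : length = 0
  · subst hlen0
    rw [if_pos rfl]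
    by_cases hb : b ≤ 0
    · rw [if_pos hb]
    · rw [if_neg hb]
      have h0 : PySem.Int.floordiv 0 b = 0 := by
        rw [PySem.Int.floordiv_eq_iff_of_pos (by omega)]
        constructor <;> nlinarith [lt_of_not_ge hb]
      rw [h0, PySem.List.pyRange_one_eq_nil (le_refl 0)]
      simp
  · have hb : 0 ≤ b := by rcases hpre with h | h; exacts [h, absurd h hlen0]
    rcases lt_or_eq_of_le hb with hb | hb0
    · -- 0 < b
      rw [if_neg hlen0, if_neg (by omega : ¬ b ≤ 0)]
      by_cases hneg : length < 0
      · -- loop: one iteration (fuel = 1), no append, exit; B: empty range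
        have ht : length.toNat = 0 := by omega
        have hmin : min length (0 + b) = length := by omega
        have hnil : PySem.List.pyRange 0 (PySem.Int.floordiv length b) 1 = [] := by
          apply PySem.List.pyRange_one_eq_nil
          have : PySem.Int.floordiv length b < 0 :=
            (PySem.Int.floordiv_lt_iff_lt_mul hb).mpr (by omega)
          omega
        rw [ht, hnil]
        simp [gbiLoopA]
        omega
      · have hpos : 0 < length := by omega
        have hmain := gbiLoopA_spec b length hb (length.toNat + 1) 0 [] (le_refl 0)
          (by omega) (by omega)
        simp only [zero_mul, zero_add, List.nil_append] at hmain
        rw [zero_add, hmain]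
    · -- b = 0
      subst hb0
      rw [if_neg hlen0, if_pos (le_refl 0)]
      by_cases hlp : 0 < length
      · simp [gbiLoopA]
        exact fun h => absurd h (by omega)
      · have ht : length.toNat = 0 := by omega
        rw [ht]
        simp [gbiLoopA]
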